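-- pv_equiv track=rewrite | github.com/pedrocunial/codejam | qualify2017/3/stall.py | get_min_ids
-- ===== SOURCE A (Python) =====
-- def get_min_ids(arr):
--     _max = -1
--     ids = []
--     arrlen = len(arr)
--     for i in range(1, arrlen - 1):
--         val = arr[i]
--         if val != -1:
--             if val > _max:
--                 ids = [i]
--                 _max = val
--             elif val == _max:
--                 ids.append(i)
--                 _max = val
--     return ids
-- ===== SOURCE B (Python) =====
-- def get_min_ids(arr):
--     inner = range(1, len(arr) - 1)
--     cand = [arr[i] for i in inner if arr[i] > -1]
--     if not cand:
--         return []
--     m = max(cand)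
--     return [i for i in inner if arr[i] == m]
-- ===== Notes on version B (the rewrite author's own statement) =====
-- stated objective: simpler
-- what changed: Replaced A's single stateful pass maintaining a running max and a rebuilt/appended index list with two stateless passes: first take the max of the interior values greater than -1, then a comprehension filtering the interior indices that attain it.
import Mathlib
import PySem

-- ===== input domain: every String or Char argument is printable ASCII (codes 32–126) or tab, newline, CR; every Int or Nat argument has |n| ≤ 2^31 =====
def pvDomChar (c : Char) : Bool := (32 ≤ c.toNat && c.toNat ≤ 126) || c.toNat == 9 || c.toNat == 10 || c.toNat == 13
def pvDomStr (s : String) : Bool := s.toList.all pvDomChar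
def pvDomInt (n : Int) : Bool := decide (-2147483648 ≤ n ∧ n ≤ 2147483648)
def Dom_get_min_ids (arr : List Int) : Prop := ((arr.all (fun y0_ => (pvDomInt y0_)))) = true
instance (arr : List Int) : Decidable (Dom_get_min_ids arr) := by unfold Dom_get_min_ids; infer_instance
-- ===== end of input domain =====

-- B replaces A's single stateful running-max pass by a max pass followed by an index-filter pass (simpler decomposition).

-- ===== PORT A =====
def get_min_ids (arr : List Int) : List Int :=
  let arrlen : Int := arr.length
  ((PySem.List.pyRange 1 (arrlen - 1) 1).foldl
    (fun (st : Int × List Int) i =>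
      let val := PySem.List.pyGetD arr i 0
      if val ≠ -1 then
        if val > st.1 then (val, [i])
        else if val = st.1 then (st.1, st.2 ++ [i])
        else st
      else st)
    (-1, [])).2

-- ===== PORT B =====
def get_min_ids_alt (arr : List Int) : List Int :=
  let inner := PySem.List.pyRange 1 ((arr.length : Int) - 1) 1
  let cand := (inner.filter (fun i => decide (-1 < PySem.List.pyGetD arr i 0))).map
      (fun i => PySem.List.pyGetD arr i 0)
  match PySem.List.max? cand (fun v => v) with
  | none => []
  | some m => inner.filter (fun i => PySem.List.pyGetD arr i 0 == m)

-- ===== PRECONDITION & SPEC =====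
def Spec_get_min_ids (arr : List Int) (out : List Int) : Prop := out = get_min_ids_alt arr
instance (arr : List Int) (out : List Int) : Decidable (Spec_get_min_ids arr out) := by unfold Spec_get_min_ids; infer_instance

-- ===== CLAIM (what is proved, stated in full; the proofs are below) =====
def Claim_equal_get_min_ids : Prop := ∀ (arr : List Int), Dom_get_min_ids arr → Spec_get_min_ids arr (get_min_ids arr)

-- ===== LEMMAS AND PROOFS =====

-- running max of g over L starting at a
def pvFMax (g : Int → Int) (a : Int) (L : List Int) : Int :=
  L.foldl (fun x i => max x (g i)) a

lemma pvFMax_le_start (g : Int → Int) (a : Int) (L : List Int) :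
    a ≤ pvFMax g a L := by
  induction L generalizing a with
  | nil => simp [pvFMax]
  | cons i L ih =>
      calc a ≤ max a (g i) := le_max_left _ _
        _ ≤ pvFMax g (max a (g i)) L := ih _
        _ = pvFMax g a (i :: L) := rfl

lemma pvFMax_mem_le (g : Int → Int) (L : List Int) :
    ∀ (a i : Int), i ∈ L → g i ≤ pvFMax g a L := by
  induction L with
  | nil => intro a i hi; simp at hi
  | cons j L ih =>
      intro a i hi
      rcases List.mem_cons.mp hi with h | h
      · subst h
        calc g i ≤ max a (g i) := le_max_right _ _
          _ ≤ pvFMax g (max a (g i)) L := pvFMax_le_start _ _ _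
          _ = pvFMax g a (i :: L) := rfl
      · exact ih _ _ h

-- A's fold computes (running max over -1, indices attaining it among values > -1)
lemma pvA_fold_char (g : Int → Int) (L : List Int) :
    L.foldl
      (fun (st : Int × List Int) i =>
        let val := g i
        if val ≠ -1 then
          if val > st.1 then (val, [i])
          else if val = st.1 then (st.1, st.2 ++ [i])
          else st
        else st)
      (-1, []) =
    (pvFMax g (-1) L,
      L.filter (fun i => g i == pvFMax g (-1) L && decide (-1 < g i))) := by
  induction L using List.reverseRecOn with
  | nil => simp [pvFMax]
  | append_singleton L j ih =>
      have hM : (-1 : Int) ≤ pvFMax g (-1) L := pvFMax_le_start _ _ _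
      have hMem : ∀ i ∈ L, g i ≤ pvFMax g (-1) L := fun i hi => pvFMax_mem_le g L _ i hi
      have hM' : pvFMax g (-1) (L ++ [j]) = max (pvFMax g (-1) L) (g j) := by
        simp [pvFMax]
      rw [List.foldl_append, ih, hM']
      set M := pvFMax g (-1) L with hMdef
      by_cases h1 : g j = -1
      · -- skipped value -1
        have hmax : max M (g j) = M := by omega
        rw [hmax]
        simp only [List.foldl_cons, List.foldl_nil, List.filter_append,
          List.filter_cons, List.filter_nil]
        simp [h1]
      · by_cases h2 : M < g j
        · -- new maximum: previous indices all fall below it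
          have hmax : max M (g j) = g j := by omega
          have hgt : (-1 : Int) < g j := by omega
          rw [hmax]
          have hnone : L.filter (fun i => g i == g j && decide (-1 < g i)) = [] := by
            rw [List.filter_eq_nil_iff]
            intro i hi
            have := hMem i hi
            simp only [Bool.and_eq_true, beq_iff_eq, decide_eq_true_eq, not_and]
            intro he; omega
          simp only [List.foldl_cons, List.foldl_nil, List.filter_append,
            List.filter_cons, List.filter_nil, hnone]
          simp [h1, h2, hgt]
        · by_cases h3 : g j = M
          · -- ties the maximum: appended
            have hmax : max M (g j) = M := by omega
            have hgt : (-1 : Int) < g j := by omega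
            have hMne : ¬ (M = -1) := by omega
            have hMgt : (-1 : Int) < M := by omega
            rw [hmax]
            simp only [List.foldl_cons, List.foldl_nil, List.filter_append,
              List.filter_cons, List.filter_nil]
            simp [h3, hMne, hMgt]
          · -- below the maximum: skipped
            have hmax : max M (g j) = M := by omega
            rw [hmax]
            simp only [List.foldl_cons, List.foldl_nil, List.filter_append,
              List.filter_cons, List.filter_nil]
            simp [h1, h2, h3]

-- the running max over -1 equals the plain max of the >(-1) candidates
lemma pvFMax_eq_cand (g : Int → Int) (L : List Int) (a : Int) (ha : -1 ≤ a) :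
    pvFMax g a L =
      ((L.filter (fun i => decide (-1 < g i))).map g).foldl max a := by
  induction L generalizing a with
  | nil => simp [pvFMax]
  | cons i L ih =>
      by_cases h : -1 < g i
      · simp only [pvFMax, List.foldl_cons, List.filter_cons, h, decide_true]
        exact ih (max a (g i)) (by omega)
      · have : max a (g i) = a := by omega
        simp only [pvFMax, List.foldl_cons, List.filter_cons, h, decide_false, this]
        exact ih a ha

lemma pv_cand_mem_gt (g : Int → Int) (L : List Int) (v : Int)
    (hv : v ∈ (L.filter (fun i => decide (-1 < g i))).map g) : -1 < v := by
  rcases List.mem_map.mp hv with ⟨i, hi, rfl⟩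
  have h2 := (List.mem_filter.mp hi).2
  simpa using h2

lemma pv_le_foldl_max (a : Int) (L : List Int) : a ≤ L.foldl max a := by
  simpa [pvFMax] using pvFMax_le_start (fun v => v) a L

-- ===== VERDICT (by name: the statement is the Claim_ definition above) =====
lemma pv_B_char (g : Int → Int) (L : List Int) :
    (match PySem.List.max? ((L.filter (fun i => decide (-1 < g i))).map g) (fun v => v) with
     | none => ([] : List Int)
     | some m => L.filter (fun i => g i == m)) =
    L.filter (fun i => g i == pvFMax g (-1) L && decide (-1 < g i)) := by
  cases hc : (L.filter (fun i => decide (-1 < g i))).map g with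
  | nil =>
      simp only [PySem.List.max?, List.foldl_nil]
      symm
      rw [List.filter_eq_nil_iff]
      intro i hi
      simp only [Bool.and_eq_true, beq_iff_eq, decide_eq_true_eq, not_and]
      intro _ hgt
      have : g i ∈ (L.filter (fun i => decide (-1 < g i))).map g :=
        List.mem_map_of_mem (List.mem_filter.mpr ⟨hi, by simpa using hgt⟩)
      rw [hc] at this; simp at this
  | cons c t =>
      have hmax : (PySem.List.max? (c :: t) (fun v => v)) = some (t.foldl max c) :=
        PySem.List.max?_id_cons c t
      rw [hmax]
      have hcgt : -1 < c := pv_cand_mem_gt g L c (by rw [hc]; exact List.mem_cons_self ..)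
      have hMc : pvFMax g (-1) L = t.foldl max c := by
        rw [pvFMax_eq_cand g L (-1) le_rfl, hc]
        simp only [List.foldl_cons]
        have : max (-1) c = c := by omega
        rw [this]
      have hMgt : -1 < pvFMax g (-1) L := by
        rw [hMc]
        have := pv_le_foldl_max c t
        omega
      apply List.filter_congr
      intro i _
      rw [← hMc]
      by_cases h : g i = pvFMax g (-1) L
      · simp [h, hMgt]
      · simp [h]

theorem get_min_ids_spec : Claim_equal_get_min_ids := by
  intro arr _
  unfold Spec_get_min_ids
  simp only [get_min_ids, get_min_ids_alt]
  rw [pvA_fold_char (fun i => PySem.List.pyGetD arr i 0)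
      (PySem.List.pyRange 1 ((arr.length : Int) - 1) 1)]
  exact (pv_B_char (fun i => PySem.List.pyGetD arr i 0)
      (PySem.List.pyRange 1 ((arr.length : Int) - 1) 1)).symm
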